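-- pv_equiv track=rewrite | github.com/sponaiyur/RAG-interview-docket | core/parser/resume_parser.py | split_by_sections
-- ===== SOURCE A (Python) =====
-- SECTION_SYNONYMS = {
--     "experience": [
--         "experience",
--         "work experience",
--         "professional experience",
--         "employment",
--         "employment history",
--         "internship",
--         "internships",
--     ],
--     "projects": [
--         "projects",
--         "my projects",
--         "academic projects",
--         "personal projects",
--         "technical projects",
--     ],
--     "skills": [
--         "skills",
--         "technical skills",
--         "core skills",
--         "skill set",
--         "technologies",
--         "technical proficiency",
--     ],
-- }
--
-- def split_by_sections(lines):
--     sections = {}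
--     current = None
--
--     for line in lines:
--         normalized = line.lower().strip()
--
--         found_section = False
--
--         for section, keywords in SECTION_SYNONYMS.items():
--             if normalized in keywords:
--                 current = section
--                 sections[current] = []
--                 found_section = True
--                 break
--
--         if found_section:
--             continue
--
--         if current:
--             sections[current].append(line)
--
--     return sections
-- ===== SOURCE B (Python) =====
-- SECTION_SYNONYMS = {
--     "experience": [
--         "experience",
--         "work experience",
--         "professional experience",
--         "employment",
--         "employment history",
--         "internship",
--         "internships",
--     ],
--     "projects": [
--         "projects",
--         "my projects",
--         "academic projects",
--         "personal projects",
--         "technical projects",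
--     ],
--     "skills": [
--         "skills",
--         "technical skills",
--         "core skills",
--         "skill set",
--         "technologies",
--         "technical proficiency",
--     ],
-- }
--
-- def split_by_sections(lines):
--     # Single reverse pass: collect (section, block) pairs back-to-front, then
--     # build the dict front-to-back (a later duplicate header overwrites).
--     blocks = []
--     buffer = []
--     for line in reversed(lines):
--         normalized = line.lower().strip()
--         section = next((s for s, kws in SECTION_SYNONYMS.items() if normalized in kws), None)
--         if section is None:
--             buffer.append(line)
--         else:
--             blocks.append((section, list(reversed(buffer))))
--             buffer = []
--     blocks.reverse()
--     sections = {}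
--     for section, block in blocks:
--         sections[section] = block
--     return sections
-- ===== Notes on version B (the rewrite author's own statement) =====
-- stated objective: alternative
-- what changed: Replaces the forward scan with mutable current-section state and in-dict appends by a single reverse pass that accumulates a buffer and emits (section, block) pairs at each header, followed by one dict-building pass over the blocks.
import Mathlib
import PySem

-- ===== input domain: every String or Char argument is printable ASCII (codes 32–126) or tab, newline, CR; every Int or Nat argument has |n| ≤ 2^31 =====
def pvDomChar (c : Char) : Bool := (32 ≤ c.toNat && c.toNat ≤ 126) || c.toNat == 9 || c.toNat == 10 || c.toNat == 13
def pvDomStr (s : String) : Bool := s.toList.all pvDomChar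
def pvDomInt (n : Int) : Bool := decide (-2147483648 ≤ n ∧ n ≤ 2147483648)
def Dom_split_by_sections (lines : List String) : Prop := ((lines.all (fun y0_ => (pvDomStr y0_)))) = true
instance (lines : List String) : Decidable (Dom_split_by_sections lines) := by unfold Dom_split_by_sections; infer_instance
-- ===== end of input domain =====

-- B replaces A's forward scan with current-section state by a reverse pass collecting
-- (section, block) pairs plus one dict-building pass (objective: alternative decomposition).

-- SECTION_SYNONYMS as an insertion-ordered association list (shared constant)
def pvSynonyms : List (String × List String) :=
  [("experience",
    ["experience", "work experience", "professional experience", "employment",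
     "employment history", "internship", "internships"]),
   ("projects",
    ["projects", "my projects", "academic projects", "personal projects",
     "technical projects"]),
   ("skills",
    ["skills", "technical skills", "core skills", "skill set", "technologies",
     "technical proficiency"])]

-- ===== PORT A =====
-- A's inner 'for section, keywords in SECTION_SYNONYMS.items(): … break' loop
def pvMatchA (normalized : String) : List (String × List String) → Option String
  | [] => none
  | (sec, keywords) :: rest =>
      if normalized ∈ keywords then some sec else pvMatchA normalized rest

-- one iteration of A's 'for line in lines' loop: state = (sections, current)
def pvStepA (st : PySem.Dict String (List String) × Option String) (line : String) :
    PySem.Dict String (List String) × Option String :=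
  let normalized := PySem.Str.strip (PySem.Str.lower line)
  match pvMatchA normalized pvSynonyms with
  | some sec => (st.1.insert sec [], some sec)
  | none =>
      match st.2 with
      | some cur => (st.1.modify cur [] (· ++ [line]), st.2)
      | none => st

def split_by_sections (lines : List String) : List (String × List String) :=
  (lines.foldl pvStepA (PySem.Dict.empty, none)).1.items

-- ===== PORT B =====
-- B's 'next((s for s, kws in SECTION_SYNONYMS.items() if normalized in kws), None)'
def pvMatchB (normalized : String) : Option String :=
  pvSynonyms.findSome? (fun p => if normalized ∈ p.2 then some p.1 else none)

-- one iteration of B's 'for line in reversed(lines)' loop: state = (buffer, blocks)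
def pvStepB (st : List String × List (String × List String)) (line : String) :
    List String × List (String × List String) :=
  let normalized := PySem.Str.strip (PySem.Str.lower line)
  match pvMatchB normalized with
  | none => (st.1 ++ [line], st.2)                      -- buffer.append(line)
  | some sec => ([], st.2 ++ [(sec, st.1.reverse)])     -- blocks.append((section, list(reversed(buffer))))

def split_by_sections_alt (lines : List String) : List (String × List String) :=
  let st := lines.reverse.foldl pvStepB ([], [])
  ((st.2.reverse).foldl (fun d p => d.insert p.1 p.2) PySem.Dict.empty).items

-- ===== PRECONDITION & SPEC =====
def Spec_split_by_sections (lines : List String) (out : List (String × List String)) : Prop := out = split_by_sections_alt lines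
instance (lines : List String) (out : List (String × List String)) : Decidable (Spec_split_by_sections lines out) := by unfold Spec_split_by_sections; infer_instance

-- ===== CLAIM (what is proved, stated in full; the proofs are below) =====
def Claim_equal_split_by_sections : Prop := ∀ (lines : List String), Dom_split_by_sections lines → Spec_split_by_sections lines (split_by_sections lines)

-- ===== LEMMAS AND PROOFS =====

-- the two header matchers agree
theorem pvMatch_gen (n : String) (l : List (String × List String)) :
    pvMatchA n l = l.findSome? (fun p => if n ∈ p.2 then some p.1 else none) := by
  induction l with
  | nil => rfl
  | cons p rest ih =>
      cases p with
      | mk s kws =>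
          simp only [pvMatchA, List.findSome?]
          by_cases h : n ∈ kws <;> simp [h, ih]

-- the two header matchers agree on the synonyms table
theorem pvMatch_eq (n : String) : pvMatchA n pvSynonyms = pvMatchB n :=
  pvMatch_gen n pvSynonyms

-- B's loop over reversed lines, as a head recursion on lines
theorem pvG_cons (l : String) (ls : List String) :
    (l :: ls).reverse.foldl pvStepB ([], []) =
      pvStepB (ls.reverse.foldl pvStepB ([], [])) l := by
  simp [List.foldl_append]

-- appending elements one by one at key s via modify = one insert of the whole list
theorem foldl_modify_insert (t : List String) (d : PySem.Dict String (List String))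
    (s : String) (v : List String) :
    t.foldl (fun d x => d.modify s [] (· ++ [x])) (d.insert s v) = d.insert s (v ++ t) := by
  induction t generalizing v with
  | nil => simp
  | cons x t ih =>
      simp only [List.foldl_cons]
      rw [show (d.insert s v).modify s [] (· ++ [x]) = d.insert s (v ++ [x]) by
        simp [PySem.Dict.modify, PySem.Dict.getD_insert_self, PySem.Dict.insert_insert_self]]
      rw [ih (v ++ [x])]
      simp

-- the same, started from an empty block at key s
theorem foldl_modify_insert_nil (t : List String) (d : PySem.Dict String (List String))
    (s : String) :
    t.foldl (fun d x => d.modify s [] (· ++ [x])) (d.insert s []) = d.insert s t := by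
  simpa using foldl_modify_insert t d s []

-- A's loop with an active current section c
theorem loopA_some (ls : List String) (d : PySem.Dict String (List String)) (c : String) :
    (ls.foldl pvStepA (d, some c)).1 =
      ((ls.reverse.foldl pvStepB ([], [])).2.reverse).foldl (fun d p => d.insert p.1 p.2)
        (((ls.reverse.foldl pvStepB ([], [])).1.reverse).foldl
          (fun d x => d.modify c [] (· ++ [x])) d) := by
  induction ls generalizing d c with
  | nil => simp
  | cons l ls ih =>
      rw [pvG_cons]
      simp only [List.foldl_cons, pvStepA, pvStepB, pvMatch_eq]
      cases pvMatchB (PySem.Str.strip (PySem.Str.lower l)) with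
      | none =>
          dsimp only
          simp only [List.reverse_append, List.reverse_cons, List.reverse_nil,
            List.nil_append, List.singleton_append, List.foldl_cons]
          exact ih _ _
      | some s =>
          dsimp only
          simp only [List.reverse_append, List.reverse_cons, List.reverse_nil,
            List.nil_append, List.singleton_append, List.foldl_cons, List.foldl_nil]
          rw [ih]
          congr 1
          exact foldl_modify_insert_nil _ d s

-- A's loop with no current section yet
theorem loopA_none (ls : List String) (d : PySem.Dict String (List String)) :
    (ls.foldl pvStepA (d, none)).1 =
      ((ls.reverse.foldl pvStepB ([], [])).2.reverse).foldl (fun d p => d.insert p.1 p.2) d := by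
  induction ls generalizing d with
  | nil => simp
  | cons l ls ih =>
      rw [pvG_cons]
      simp only [List.foldl_cons, pvStepA, pvStepB, pvMatch_eq]
      cases pvMatchB (PySem.Str.strip (PySem.Str.lower l)) with
      | none =>
          dsimp only
          exact ih _
      | some s =>
          dsimp only
          simp only [List.reverse_append, List.reverse_cons, List.reverse_nil,
            List.nil_append, List.singleton_append, List.foldl_cons]
          rw [loopA_some]
          congr 1
          exact foldl_modify_insert_nil _ d s

-- ===== VERDICT (by name: the statement is the Claim_ definition above) =====
theorem split_by_sections_spec : Claim_equal_split_by_sections := by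
  intro lines _
  unfold Spec_split_by_sections split_by_sections split_by_sections_alt
  rw [loopA_none]
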